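-- pv_equiv track=rewrite | github.com/ZephronCoder/distil | api/routes/chat.py | _detect_repeated_substring
-- ===== SOURCE A (Python) =====
-- def _detect_repeated_substring(text: str, win: int = 50, step: int = 25) -> int:
--     """Cheap repetition heuristic: count how many ``win``-char windows
--     starting at multiples of ``step`` repeat in ``text``.
--     """
--     seen = set()
--     repeats = 0
--     if not text or len(text) < win * 2:
--         return 0
--     for i in range(0, len(text) - win, step):
--         s = text[i:i + win]
--         if s in seen:
--             repeats += 1
--         seen.add(s)
--     return repeats
-- ===== SOURCE B (Python) =====
-- def _detect_repeated_substring(text: str, win: int = 50, step: int = 25) -> int: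
--     """Sort-then-scan: sort the windows so equal ones become adjacent, then
--     count adjacent equal pairs (each group of m equal windows contributes m-1
--     repeats, exactly what the seen-set pass counts)."""
--     if not text or len(text) < win * 2:
--         return 0
--     windows = sorted(text[i:i + win] for i in range(0, len(text) - win, step))
--     repeats = 0
--     for prev, cur in zip(windows, windows[1:]):
--         if prev == cur:
--             repeats += 1
--     return repeats
-- ===== Notes on version B (the rewrite author's own statement) =====
-- stated objective: alternative
-- what changed: Replaces the hash-set membership pass with a sort-then-scan algorithm: sort all windows so equal windows become adjacent, then count adjacent equal pairs; correct because each value occurring m times contributes m-1 both to A's seen-set repeats and to the adjacent-equal pairs of the sorted list.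
import Mathlib
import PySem

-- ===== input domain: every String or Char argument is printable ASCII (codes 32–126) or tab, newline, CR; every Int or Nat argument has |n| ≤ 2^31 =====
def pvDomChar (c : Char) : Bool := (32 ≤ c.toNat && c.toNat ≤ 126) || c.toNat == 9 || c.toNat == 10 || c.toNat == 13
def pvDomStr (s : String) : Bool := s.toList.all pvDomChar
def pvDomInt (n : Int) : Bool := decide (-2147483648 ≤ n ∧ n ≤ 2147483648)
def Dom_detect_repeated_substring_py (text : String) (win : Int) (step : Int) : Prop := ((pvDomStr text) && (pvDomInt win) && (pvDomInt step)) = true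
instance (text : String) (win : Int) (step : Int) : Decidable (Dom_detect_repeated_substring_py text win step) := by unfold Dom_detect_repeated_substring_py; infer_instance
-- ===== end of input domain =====

-- B replaces A's incremental hash-set pass by sort-then-scan: sort the windows and count adjacent equal pairs (alternative algorithm, similar cost).


-- ===== PORT A =====
-- literal port of A: fold over range(0, len(text)-win, step) carrying (seen, repeats)
def detect_repeated_substring_py (text : String) (win : Int) (step : Int) : Int :=
  if text = "" ∨ PySem.Str.len text < win * 2 then 0
  else
    ((PySem.List.pyRange 0 (PySem.Str.len text - win) step).foldl
      (fun (st : PySem.Set (List Char) × Int) i =>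
        (PySem.Set.add st.1 (PySem.List.slice text.toList (some i) (some (i + win))),
         if PySem.Set.contains st.1 (PySem.List.slice text.toList (some i) (some (i + win))) then st.2 + 1 else st.2))
      (PySem.Set.empty, 0)).2

-- ===== PORT B =====
-- port of B: sort the list of windows, then count adjacent equal pairs over zip(windows, windows[1:])
def detect_repeated_substring_py_alt (text : String) (win : Int) (step : Int) : Int :=
  if text = "" ∨ PySem.Str.len text < win * 2 then 0
  else
    (List.zip
        (PySem.List.sorted ((PySem.List.pyRange 0 (PySem.Str.len text - win) step).map
          (fun i => PySem.List.slice text.toList (some i) (some (i + win)))) (fun w => w) false)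
        (PySem.List.sorted ((PySem.List.pyRange 0 (PySem.Str.len text - win) step).map
          (fun i => PySem.List.slice text.toList (some i) (some (i + win)))) (fun w => w) false).tail).foldl
      (fun (r : Int) p => if p.1 = p.2 then r + 1 else r) 0

-- ===== PRECONDITION & SPEC =====
-- Pre_ excludes only step = 0 on inputs that pass the guard, where Python's range(...) raises ValueError (in A and in B alike).
def Pre_detect_repeated_substring_py (text : String) (win : Int) (step : Int) : Prop :=
  step = 0 → (text = "" ∨ PySem.Str.len text < win * 2)
instance (text : String) (win : Int) (step : Int) : Decidable (Pre_detect_repeated_substring_py text win step) := by unfold Pre_detect_repeated_substring_py; infer_instance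
def pvWitness_detect_repeated_substring_py : String × Int × Int := ("abcabcabc", 3, 3)
def Spec_detect_repeated_substring_py (text : String) (win : Int) (step : Int) (out : Int) : Prop := out = detect_repeated_substring_py_alt text win step
instance (text : String) (win : Int) (step : Int) (out : Int) : Decidable (Spec_detect_repeated_substring_py text win step out) := by unfold Spec_detect_repeated_substring_py; infer_instance

-- ===== CLAIM (what is proved, stated in full; the proofs are below) =====
def Claim_equal_detect_repeated_substring_py : Prop := ∀ (text : String) (win : Int) (step : Int), Dom_detect_repeated_substring_py text win step → Pre_detect_repeated_substring_py text win step → Spec_detect_repeated_substring_py text win step (detect_repeated_substring_py text win step)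

-- ===== LEMMAS AND PROOFS =====

-- invariant of A's loop: repeats ends as r + |l| + |seen| - |set after inserting all windows|
lemma foldl_repeats_eq (f : Int → List Char) (l : List Int) :
    ∀ (seen : PySem.Set (List Char)) (r : Int),
      (l.foldl
        (fun (st : PySem.Set (List Char) × Int) i =>
          (PySem.Set.add st.1 (f i),
           if PySem.Set.contains st.1 (f i) then st.2 + 1 else st.2))
        (seen, r)).2
      = r + (l.length : Int) + (seen.length : Int)
        - (((l.map f).foldl PySem.Set.add seen).length : Int) := by
  induction l with
  | nil => intro seen r; simp
  | cons i l ih =>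
    intro seen r
    simp only [List.foldl_cons, List.map_cons]
    by_cases h : PySem.Set.contains seen (f i)
    · rw [if_pos h, show PySem.Set.add seen (f i) = seen from by
        simp only [PySem.Set.add]; rw [if_pos h], ih]
      simp only [List.length_cons]; push_cast; omega
    · rw [if_neg h, show PySem.Set.add seen (f i) = seen ++ [f i] from by
        simp only [PySem.Set.add]; rw [if_neg h], ih]
      simp only [List.length_cons, List.length_append, List.length_nil]
      push_cast; omega

-- |set(l)| = number of distinct elements of l
lemma ofList_length_eq_card (l : List (List Char)) :
    ((PySem.Set.ofList l).length : Int) = (l.toFinset.card : Int) := by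
  have hfin : (PySem.Set.ofList l).toFinset = l.toFinset := by
    apply Finset.ext; intro x
    simp [List.mem_toFinset, PySem.Set.mem_ofList]
  have hn : (PySem.Set.ofList l).Nodup := PySem.Set.nodup_ofList l
  rw [← hfin, List.toFinset_card_of_nodup hn]

-- adjacent-equal count of a sorted (nondecreasing) list = length - number of distinct elements
lemma adj_count_sorted (l : List (List Char)) (h : l.Pairwise (· ≤ ·)) :
    ∀ r : Int,
      (List.zip l l.tail).foldl (fun (r : Int) p => if p.1 = p.2 then r + 1 else r) r
        = r + (l.length : Int) - (l.toFinset.card : Int) := by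
  induction l with
  | nil => intro r; simp
  | cons a t ih =>
    cases t with
    | nil => intro r; simp
    | cons b t' =>
      intro r
      rcases List.pairwise_cons.mp h with ⟨ha, ht⟩
      have hstep := ih ht
      simp only [List.tail_cons, List.zip_cons_cons, List.foldl_cons] at *
      by_cases hab : a = b
      · rw [if_pos hab, hstep]
        have hmem : a ∈ (b :: t').toFinset := by
          rw [List.mem_toFinset]; exact hab ▸ List.mem_cons_self
        have hcard : (a :: b :: t').toFinset.card = (b :: t').toFinset.card := by
          conv_lhs => rw [List.toFinset_cons]
          rw [Finset.insert_eq_self.mpr hmem]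
        rw [hcard]
        simp only [List.length_cons]; push_cast; ring
      · rw [if_neg hab, hstep]
        have hnot : a ∉ (b :: t') := by
          intro hmem
          rcases List.mem_cons.mp hmem with h1 | h1
          · exact hab h1
          · rcases List.pairwise_cons.mp ht with ⟨hb, _⟩
            exact hab (le_antisymm (ha b List.mem_cons_self) (hb a h1))
        have hcard : (a :: b :: t').toFinset.card = (b :: t').toFinset.card + 1 := by
          conv_lhs => rw [List.toFinset_cons]
          exact Finset.card_insert_of_notMem (by rw [List.mem_toFinset]; exact hnot)
        rw [hcard]
        simp only [List.length_cons]; push_cast; omega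

-- ===== VERDICT (by name: the statement is the Claim_ definition above) =====
theorem detect_repeated_substring_py_spec : Claim_equal_detect_repeated_substring_py := by
  intro text win step _ _
  unfold Spec_detect_repeated_substring_py detect_repeated_substring_py detect_repeated_substring_py_alt
  by_cases hg : text = "" ∨ PySem.Str.len text < win * 2
  · rw [if_pos hg, if_pos hg]
  · rw [if_neg hg, if_neg hg]
    set l := (PySem.List.pyRange 0 (PySem.Str.len text - win) step).map
      (fun i => PySem.List.slice text.toList (some i) (some (i + win))) with hl
    have hinst : (fun (a b : List Char) => a.decidableLT b)
        = (LinearOrder.toDecidableLT : DecidableLT (List Char)) := by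
      funext a b; exact Subsingleton.elim _ _
    have hp : (PySem.List.sorted l (fun w => w) false).Pairwise (· ≤ ·) := by
      rw [hinst]; exact PySem.List.sorted_pairwise l (fun w => w)
    have htf : (PySem.List.sorted l (fun w => w) false).toFinset = l.toFinset := by
      apply Finset.ext; intro x
      simp only [List.mem_toFinset]
      exact (PySem.List.sorted_perm l (fun w => w) false).mem_iff
    rw [foldl_repeats_eq (fun i => PySem.List.slice text.toList (some i) (some (i + win)))]
    rw [adj_count_sorted _ hp]
    simp only [PySem.Set.empty, List.length_nil]
    rw [← PySem.Set.ofList_eq_foldl, ofList_length_eq_card]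
    rw [PySem.List.length_sorted, htf]
    rw [hl, List.length_map]
    ring
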